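-- pv_equiv track=rewrite | github.com/VinnieMuffinMan/Minesweeper | board.py | pretty_to_string
-- ===== SOURCE A (Python) =====
-- def pretty_to_string(board, mines=False):
--     w = len(board[0]) - 1
--     h = len(board) - 1
--     s = ""
--     for i in range(len(str(w)) - 1, -1, -1):
--         s += " " * (len(str(h)) + 1)
--         c = 0
--         d = 10**i
--         first_zero = i > 0
--         for i in range(w + 1):
--             if first_zero:
--                 s += " "
--             else:
--                 s += str(c)
--             if i % d == d - 1:
--                 c += 1
--                 c %= 10
--                 first_zero = False
--         s += "\n"
--
--     s += "\n"
--     if mines: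
--         dic = {-4: "F", -3: "f", -2: "X", -1: "."}
--     else:
--         dic = {-4: "f", -3: "f", -2: ".", -1: "."}
--
--     for i, row in enumerate(board):
--         num = ("%" + str(len(str(h))) + "d ") % i
--         s += num
--         for col in row:
--             if col < 0:
--                 s += dic[col]
--             else:
--                 s += str(col)
--         s += "\n"
--     return s
-- ===== SOURCE B (Python) =====
-- def pretty_to_string(board, mines=False):
--     w = len(board[0]) - 1
--     h = len(board) - 1
--     hw = len(str(h))
--     nd = len(str(w))
--     lines = []
--     for p in range(nd):
--         e = nd - 1 - p
--         d = 10 ** e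
--         lines.append(" " * (hw + 1) + "".join(
--             " " if e > 0 and j < d else str(j // d % 10) for j in range(w + 1)))
--     lines.append("")
--     dic = {-4: "F", -3: "f", -2: "X", -1: "."} if mines else {-4: "f", -3: "f", -2: ".", -1: "."}
--     for i, row in enumerate(board):
--         lines.append(str(i).rjust(hw) + " " + "".join(dic[c] if c < 0 else str(c) for c in row))
--     return "".join(line + "\n" for line in lines)
-- ===== Notes on version B (the rewrite author's own statement) =====
-- stated objective: idiomatic
-- what changed: Header digits are computed by a closed-form formula j//10**e % 10 (with leading-zero blanking by the condition j < 10**e) instead of A's stateful modular counter with a first_zero flag, rows use str(i).rjust instead of printf-style %Nd formatting, and the output is assembled as a list of lines joined once instead of repeated string +=.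
import Mathlib
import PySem

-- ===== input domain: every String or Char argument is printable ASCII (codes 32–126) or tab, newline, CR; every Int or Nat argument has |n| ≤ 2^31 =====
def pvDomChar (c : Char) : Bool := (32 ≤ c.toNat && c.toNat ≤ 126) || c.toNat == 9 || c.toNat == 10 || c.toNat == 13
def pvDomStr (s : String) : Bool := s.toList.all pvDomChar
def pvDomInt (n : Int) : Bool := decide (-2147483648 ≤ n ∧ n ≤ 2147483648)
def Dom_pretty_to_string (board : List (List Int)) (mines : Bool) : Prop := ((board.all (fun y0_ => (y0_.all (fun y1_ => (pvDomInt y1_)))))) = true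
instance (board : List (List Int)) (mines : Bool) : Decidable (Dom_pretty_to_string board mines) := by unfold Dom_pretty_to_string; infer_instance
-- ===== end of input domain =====

-- B replaces A's stateful modular-counter/first_zero header generation by a closed-form digit
-- formula per column, printf-style row numbering by rjust, and += accumulation by a join of lines.

-- ===== PORT A =====
-- str(i) is ported as PySem.Int.toChars, strings are built as List Char and packed at the end.
-- "%Nd " % i (N = len(str(h)) > 0) right-justifies str(i) with spaces: exact since i ≥ 0 here.
def pretty_to_string (board : List (List Int)) (mines : Bool) : String :=
  let w : Int := ((board.headD []).length : Int) - 1   -- board[0]; Pre_ excludes the empty board (IndexError)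
  let h : Int := (board.length : Int) - 1
  let s : List Char := (PySem.List.pyRange (((PySem.Int.toChars w).length : Int) - 1) (-1) (-1)).foldl
    (fun s i =>
      let s := s ++ List.replicate ((PySem.Int.toChars h).length + 1) ' '
      let d : Int := 10 ^ i.toNat      -- 10**i with i ≥ 0 along this countdown range
      let r := (PySem.List.pyRange 0 (w + 1) 1).foldl
        (fun (acc : List Char × Int × Bool) j =>
          let s := if acc.2.2 then acc.1 ++ [' '] else acc.1 ++ PySem.Int.toChars acc.2.1
          if PySem.Int.mod j d = d - 1 then (s, PySem.Int.mod (acc.2.1 + 1) 10, false)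
          else (s, acc.2.1, acc.2.2))
        (s, 0, decide (0 < i))
      r.1 ++ ['\n'])
    []
  let s := s ++ ['\n']
  let dic : PySem.Dict Int (List Char) :=
    if mines then PySem.Dict.ofList [(-4, ['F']), (-3, ['f']), (-2, ['X']), (-1, ['.'])]
    else PySem.Dict.ofList [(-4, ['f']), (-3, ['f']), (-2, ['.']), (-1, ['.'])]
  let s := (PySem.List.enumerate board).foldl
    (fun s p =>
      let num := List.replicate ((PySem.Int.toChars h).length - (PySem.Int.toChars p.1).length) ' '
                   ++ PySem.Int.toChars p.1 ++ [' ']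
      let s := s ++ num
      let s := p.2.foldl
        (fun s col => if col < 0 then s ++ ((dic.get? col).getD []) else s ++ PySem.Int.toChars col)
        s   -- dic[col]: Pre_ excludes col < -4 (KeyError), so getD is never taken
      s ++ ['\n'])
    s
  String.mk s

-- ===== PORT B =====
-- str.rjust(n) with the default space fill
def rjustChars (cs : List Char) (n : Nat) : List Char := List.replicate (n - cs.length) ' ' ++ cs

def pretty_to_string_alt (board : List (List Int)) (mines : Bool) : String :=
  let w : Int := ((board.headD []).length : Int) - 1   -- board[0]; Pre_ excludes the empty board
  let h : Int := (board.length : Int) - 1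
  let hw : Nat := (PySem.Int.toChars h).length
  let nd : Nat := (PySem.Int.toChars w).length
  let headers : List (List Char) := (List.range nd).map (fun p =>
    let e : Nat := nd - 1 - p
    let d : Int := 10 ^ e
    List.replicate (hw + 1) ' ' ++
      ((PySem.List.pyRange 0 (w + 1) 1).map (fun j =>
        if 0 < e ∧ j < d then [' ']
        else PySem.Int.toChars (PySem.Int.mod (PySem.Int.floordiv j d) 10))).flatten)
  let dic : PySem.Dict Int (List Char) :=
    if mines then PySem.Dict.ofList [(-4, ['F']), (-3, ['f']), (-2, ['X']), (-1, ['.'])]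
    else PySem.Dict.ofList [(-4, ['f']), (-3, ['f']), (-2, ['.']), (-1, ['.'])]
  let rows : List (List Char) := (PySem.List.enumerate board).map (fun p =>
    rjustChars (PySem.Int.toChars p.1) hw ++ [' '] ++
      (p.2.map (fun c => if c < 0 then (dic.get? c).getD [] else PySem.Int.toChars c)).flatten)
  String.mk (((headers ++ [[]] ++ rows).map (· ++ ['\n'])).flatten)

-- ===== PRECONDITION & SPEC =====
-- Pre_ excludes exactly the inputs where A raises: the empty board (IndexError on board[0])
-- and any cell below -4 (KeyError in the dic lookup).
def Pre_pretty_to_string (board : List (List Int)) (mines : Bool) : Prop :=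
  board ≠ [] ∧ ∀ row ∈ board, ∀ c ∈ row, -4 ≤ c
instance (board : List (List Int)) (mines : Bool) : Decidable (Pre_pretty_to_string board mines) := by
  unfold Pre_pretty_to_string; infer_instance
def pvWitness_pretty_to_string : List (List Int) × Bool := ([[0, 1], [-1, 9]], false)

def Spec_pretty_to_string (board : List (List Int)) (mines : Bool) (out : String) : Prop := out = pretty_to_string_alt board mines
instance (board : List (List Int)) (mines : Bool) (out : String) : Decidable (Spec_pretty_to_string board mines out) := by unfold Spec_pretty_to_string; infer_instance

-- ===== CLAIM (what is proved, stated in full; the proofs are below) =====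
def Claim_equal_pretty_to_string : Prop := ∀ (board : List (List Int)) (mines : Bool), Dom_pretty_to_string board mines → Pre_pretty_to_string board mines → Spec_pretty_to_string board mines (pretty_to_string board mines)

-- ===== LEMMAS AND PROOFS =====

theorem succ_mod_zero_iff (n D : Nat) (hD : 0 < D) : (n+1) % D = 0 ↔ n % D = D - 1 := by
  constructor <;> intro h
  · have h1 := Nat.add_mod n 1 D
    have h2 := Nat.mod_lt n hD
    rcases Nat.eq_or_lt_of_le hD with h3 | h3
    · omega
    · have he : 1 % D = 1 := Nat.mod_eq_of_lt h3
      rw [he] at h1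
      have h5 : n % D + 1 ≤ D := by omega
      rcases Nat.eq_or_lt_of_le h5 with h6 | h6
      · omega
      · rw [Nat.mod_eq_of_lt h6] at h1; omega
  · rw [Nat.add_mod, h]
    rcases Nat.eq_or_lt_of_le hD with h3 | h3
    · rw [← h3]
    · rw [Nat.mod_eq_of_lt h3, Nat.sub_add_cancel hD, Nat.mod_self]

theorem div_succ_mod_eq (n D : Nat) (hD : 0 < D) (h : n % D = D - 1) : (n+1)/D = n/D + 1 := by
  rw [Nat.succ_div, if_pos (Nat.dvd_iff_mod_eq_zero.mpr ((succ_mod_zero_iff n D hD).mpr h))]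

theorem div_succ_mod_ne (n D : Nat) (hD : 0 < D) (h : n % D ≠ D - 1) : (n+1)/D = n/D := by
  rw [Nat.succ_div, if_neg, Nat.add_zero]
  intro hdvd
  exact h ((succ_mod_zero_iff n D hD).mp (Nat.dvd_iff_mod_eq_zero.mp hdvd))

def cellC (e : Nat) (j : Nat) : List Char :=
  if 0 < e ∧ j < 10^e then [' '] else PySem.Int.toChars ((j / 10^e % 10 : Nat) : Int)

theorem innerA (e : Nat) (len : Nat) (cs : List Char) :
  ((List.range len).map (fun (k : Nat) => (k:Int))).foldl
    (fun (acc : List Char × Int × Bool) j =>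
      let s := if acc.2.2 then acc.1 ++ [' '] else acc.1 ++ PySem.Int.toChars acc.2.1
      if PySem.Int.mod j ((10:Int)^e) = (10:Int)^e - 1 then (s, PySem.Int.mod (acc.2.1 + 1) 10, false)
      else (s, acc.2.1, acc.2.2))
    (cs, 0, decide (0 < e))
  = (cs ++ ((List.range len).map (cellC e)).flatten,
     ((len / 10^e % 10 : Nat) : Int), decide (0 < e ∧ len < 10^e)) := by
  have hd : 0 < 10^e := pow_pos (by norm_num : (0:Nat) < 10) e
  have h10 : 0 < e → 10 ≤ 10^e := by
    intro he
    calc 10 = 10^1 := by norm_num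
      _ ≤ 10^e := Nat.pow_le_pow_right (by norm_num) he
  induction len with
  | zero => simp [hd]
  | succ n ih =>
    rw [List.range_succ, List.map_append, List.foldl_append, ih]
    simp only [List.map_append, List.foldl_cons, List.foldl_nil, List.map_cons, List.map_nil,
      List.flatten_append, List.flatten_cons, List.flatten_nil, List.append_nil]
    have hcast : ((10:Int)^e) = ((10^e : Nat) : Int) := by push_cast; ring
    rw [hcast, PySem.Int.mod_natCast]
    have hmod : n % 10^e < 10^e := Nat.mod_lt n hd
    by_cases hc : n % 10^e = 10^e - 1
    · have hcond : ((n % 10^e : Nat) : Int) = ((10^e : Nat) : Int) - 1 := by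
        rw [hc]; omega
      have hdiv : (n+1) / 10^e = n / 10^e + 1 := div_succ_mod_eq n _ hd hc
      rw [if_pos hcond, Prod.mk.injEq, Prod.mk.injEq]
      refine ⟨?_, ?_, ?_⟩
      · rw [← List.append_assoc]
        by_cases hfz : 0 < e ∧ n < 10^e <;> simp [cellC, hfz]
      · have hmodc : PySem.Int.mod (((n / 10^e % 10 : Nat) : Int) + 1) 10
            = (((n / 10^e % 10 + 1) % 10 : Nat) : Int) := by
          have h9 := PySem.Int.mod_natCast (n / 10^e % 10 + 1) 10
          push_cast at h9 ⊢
          exact h9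
        rw [hmodc, hdiv]
        congr 1
        omega
      · have hne : ¬ (0 < e ∧ n + 1 < 10^e) := by
          rintro ⟨he, hlt⟩
          have hB := h10 he
          have hle := Nat.mod_le n (10^e)
          omega
        simp [hne]
    · have hcond : ¬ (((n % 10^e : Nat) : Int) = ((10^e : Nat) : Int) - 1) := by
        intro h; apply hc; omega
      have hdiv : (n+1) / 10^e = n / 10^e := div_succ_mod_ne n _ hd hc
      have hiff : n < 10^e ↔ n + 1 < 10^e := by
        constructor <;> intro h
        · rcases Nat.lt_or_ge (n+1) (10^e) with h2 | h2
          · exact h2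
          · exfalso; apply hc; rw [Nat.mod_eq_of_lt h]; omega
        · omega
      rw [if_neg hcond, Prod.mk.injEq, Prod.mk.injEq]
      refine ⟨?_, ?_, ?_⟩
      · rw [← List.append_assoc]
        by_cases hfz : 0 < e ∧ n < 10^e <;> simp [cellC, hfz]
      · rw [hdiv]
      · simp only [decide_eq_decide]
        constructor <;> rintro ⟨he, h2⟩
        · exact ⟨he, hiff.mp h2⟩
        · exact ⟨he, hiff.mpr h2⟩

def hlineC (hw len e : Nat) : List Char :=
  List.replicate (hw+1) ' ' ++ ((List.range len).map (cellC e)).flatten ++ ['\n']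

theorem outerA (hw len nd : Nat) (ks : List Nat) (hks : ∀ k ∈ ks, k < nd) (s : List Char) :
  (ks.map (fun (k : Nat) => ((nd:Int) - 1 - (k:Int)))).foldl
    (fun s i =>
      let s := s ++ List.replicate (hw + 1) ' '
      let d : Int := 10 ^ i.toNat
      let r := (PySem.List.pyRange 0 (((len:Int) - 1) + 1) 1).foldl
        (fun (acc : List Char × Int × Bool) j =>
          let s := if acc.2.2 then acc.1 ++ [' '] else acc.1 ++ PySem.Int.toChars acc.2.1
          if PySem.Int.mod j d = d - 1 then (s, PySem.Int.mod (acc.2.1 + 1) 10, false)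
          else (s, acc.2.1, acc.2.2))
        (s, 0, decide (0 < i))
      r.1 ++ ['\n']) s
  = s ++ (ks.map (fun k => hlineC hw len (nd - 1 - k))).flatten := by
  have hrange : PySem.List.pyRange 0 (((len:Int) - 1) + 1) 1
      = (List.range len).map (fun (k : Nat) => (k:Int)) := by
    have h1 : ((len:Int) - 1) + 1 = (len:Int) := by ring
    rw [h1, PySem.List.pyRange_zero_natCast]
  induction ks generalizing s with
  | nil => simp
  | cons k ks ih =>
    have htn : ((nd:Int) - 1 - (k:Int)).toNat = nd - 1 - k := by
      have := hks k (by simp); omega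
    have hdec : decide ((0:Int) < ((nd:Int) - 1 - (k:Int))) = decide (0 < nd - 1 - k) := by
      simp only [decide_eq_decide]
      have := hks k (by simp); omega
    simp only [List.map_cons, List.foldl_cons, hrange, htn, hdec, innerA]
    simp only [hrange] at ih
    rw [ih (fun x hx => hks x (List.mem_cons_of_mem _ hx))]
    simp [hlineC]

def rlineC (hw : Nat) (dic : PySem.Dict Int (List Char)) (p : Int × List Int) : List Char :=
  List.replicate (hw - (PySem.Int.toChars p.1).length) ' ' ++
    (PySem.Int.toChars p.1 ++
      ' ' :: ((p.2.map (fun c => if c < 0 then (dic.get? c).getD [] else PySem.Int.toChars c)).flatten ++ ['\n']))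

theorem rowfoldA (dic : PySem.Dict Int (List Char)) (row : List Int) (s : List Char) :
  row.foldl (fun s col => if col < 0 then s ++ ((dic.get? col).getD []) else s ++ PySem.Int.toChars col) s
  = s ++ (row.map (fun c => if c < 0 then (dic.get? c).getD [] else PySem.Int.toChars c)).flatten := by
  induction row generalizing s with
  | nil => simp
  | cons c row ih =>
    simp only [List.foldl_cons, List.map_cons, List.flatten_cons, ih]
    by_cases h : c < 0 <;> simp [h]

theorem rowsA (hw : Nat) (dic : PySem.Dict Int (List Char)) (l : List (Int × List Int)) (s : List Char) :
  l.foldl (fun s p =>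
      let num := List.replicate (hw - (PySem.Int.toChars p.1).length) ' '
                   ++ PySem.Int.toChars p.1 ++ [' ']
      let s := s ++ num
      let s := p.2.foldl
        (fun s col => if col < 0 then s ++ ((dic.get? col).getD []) else s ++ PySem.Int.toChars col)
        s
      s ++ ['\n']) s
  = s ++ (l.map (rlineC hw dic)).flatten := by
  induction l generalizing s with
  | nil => simp
  | cons p l ih =>
    simp only [List.foldl_cons, List.map_cons, List.flatten_cons, rowfoldA,
      List.append_assoc, List.cons_append, List.nil_append, List.singleton_append]
    simp only [rowfoldA, List.append_assoc, List.cons_append, List.nil_append,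
      List.singleton_append] at ih
    rw [ih]
    simp only [rlineC, List.append_assoc, List.cons_append, List.nil_append, List.singleton_append]

theorem Bcell_eq (e jn : Nat) :
  (if 0 < e ∧ (jn:Int) < (10:Int)^e then [' ']
   else PySem.Int.toChars (PySem.Int.mod (PySem.Int.floordiv (jn:Int) ((10:Int)^e)) 10)) = cellC e jn := by
  have hcast : ((10:Int)^e) = ((10^e:Nat):Int) := by push_cast; ring
  rw [hcast, PySem.Int.floordiv_natCast]
  have hm : PySem.Int.mod ((jn / 10^e : Nat) : Int) 10 = ((jn / 10^e % 10 : Nat) : Int) := by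
    have h9 := PySem.Int.mod_natCast (jn / 10^e) 10; push_cast at h9 ⊢; exact h9
  rw [hm]
  unfold cellC
  by_cases h : 0 < e ∧ jn < 10 ^ e
  · rw [if_pos ⟨h.1, by exact_mod_cast h.2⟩, if_pos h]
  · rw [if_neg (fun hc => h ⟨hc.1, by exact_mod_cast hc.2⟩), if_neg h]
-- formula per column, printf-style row numbering by rjust, and += accumulation by a join of lines.

-- ===== PORT A =====
-- str(i) is ported as PySem.Int.toChars, strings are built as List Char and packed at the end.
-- "%Nd " % i (N = len(str(h)) > 0) right-justifies str(i) with spaces: exact since i ≥ 0 here.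

theorem portAB (board : List (List Int)) (mines : Bool) :
    pretty_to_string board mines = pretty_to_string_alt board mines := by
  simp only [pretty_to_string, pretty_to_string_alt, rjustChars]
  rw [PySem.List.pyRange_neg_one]
  have hnd : (((PySem.Int.toChars (((board.headD []).length : Int) - 1)).length : Int) - 1 - (-1)).toNat
      = (PySem.Int.toChars (((board.headD []).length : Int) - 1)).length := by omega
  rw [hnd]
  rw [outerA ((PySem.Int.toChars ((board.length : Int) - 1)).length)
      ((board.headD []).length)
      ((PySem.Int.toChars (((board.headD []).length : Int) - 1)).length)
      (List.range ((PySem.Int.toChars (((board.headD []).length : Int) - 1)).length))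
      (fun k hk => List.mem_range.mp hk) []]
  rw [rowsA]
  simp only [List.map_map, List.map_append, List.flatten_append]
  have hrange : PySem.List.pyRange 0 ((((board.headD []).length : Int) - 1) + 1) 1
      = (List.range (board.headD []).length).map (fun (k : Nat) => (k:Int)) := by
    have h1 : (((board.headD []).length : Int) - 1) + 1 = ((board.headD []).length : Int) := by ring
    rw [h1, PySem.List.pyRange_zero_natCast]
  simp only [hrange, List.map_map, Function.comp_def, Bcell_eq]
  simp only [hlineC, List.append_assoc, List.cons_append, List.nil_append,
    List.singleton_append, List.flatten_cons, List.flatten_nil, List.map_cons, List.map_nil,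
    List.append_nil, show ∀ (hw : Nat) (dic : PySem.Dict Int (List Char)),
      rlineC hw dic = fun p => List.replicate (hw - (PySem.Int.toChars p.1).length) ' ' ++
        (PySem.Int.toChars p.1 ++
          ' ' :: ((p.2.map (fun c => if c < 0 then (dic.get? c).getD [] else PySem.Int.toChars c)).flatten ++ ['\n']))
      from fun _ _ => rfl]

-- ===== VERDICT (by name: the statement is the Claim_ definition above) =====
theorem pretty_to_string_spec : Claim_equal_pretty_to_string := by
  intro board mines _ _
  show pretty_to_string board mines = pretty_to_string_alt board mines
  exact portAB board mines
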